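-- pv_equiv track=rewrite | github.com/joeeoj/python-workout | comprehension/supervocalic_words.py | supervocalic
-- ===== SOURCE A (Python) =====
-- VOWELS = {'a', 'e', 'i', 'o', 'u'}
--
-- VOWELS_LIST = sorted(list(VOWELS))
--
-- def supervocalic(word: str) -> bool:
--     """word that contains all 5 vowels in (a,e,i,o,u), each appears once, and are in alphabetical order"""
--     idx = 0
--     for c in word:
--         if c in VOWELS:
--             if idx < len(VOWELS_LIST) and c == VOWELS_LIST[idx]:
--                 idx += 1
--             else:
--                 return False
--     if idx != 5:
--         return False
--     return True
-- ===== SOURCE B (Python) =====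
-- VOWELS = {'a', 'e', 'i', 'o', 'u'}
--
-- def supervocalic(word: str) -> bool:
--     """word that contains all 5 vowels in (a,e,i,o,u), each appears once, and are in alphabetical order"""
--     return ''.join(c for c in word if c in VOWELS) == 'aeiou'
-- ===== Notes on version B (the rewrite author's own statement) =====
-- stated objective: simpler
-- what changed: Replaces A's interleaved index-pointer state machine (early returns, bounds check, final counter test) with a single filter extracting the vowel subsequence followed by one equality comparison against 'aeiou'.
import Mathlib
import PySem

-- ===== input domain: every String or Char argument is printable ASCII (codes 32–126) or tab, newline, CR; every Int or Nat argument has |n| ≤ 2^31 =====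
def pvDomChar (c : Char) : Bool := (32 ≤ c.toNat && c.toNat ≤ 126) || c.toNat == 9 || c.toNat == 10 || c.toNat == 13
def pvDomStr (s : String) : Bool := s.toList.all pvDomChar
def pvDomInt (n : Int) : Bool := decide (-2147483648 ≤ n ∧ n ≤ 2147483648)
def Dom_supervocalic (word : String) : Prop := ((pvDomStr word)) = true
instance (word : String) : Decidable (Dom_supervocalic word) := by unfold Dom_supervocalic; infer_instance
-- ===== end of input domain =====

-- B replaces A's index-pointer state machine with a vowel filter plus one equality check; objective: simpler.

-- ===== PORT A =====
-- 'c in VOWELS'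
def pvIsVowel (c : Char) : Bool := c == 'a' || c == 'e' || c == 'i' || c == 'o' || c == 'u'

-- VOWELS_LIST = sorted(list(VOWELS))
def pvVowelsList : List Char := ['a', 'e', 'i', 'o', 'u']

-- the for-loop of A, state = idx; early 'return False' becomes the else-branch
def pvLoopA : List Char → Nat → Bool
  | [], idx => idx == 5                -- 'if idx != 5: return False / return True'
  | c :: cs, idx =>
      if pvIsVowel c then
        if decide (idx < pvVowelsList.length) && (c == pvVowelsList.getD idx ' ') then
          pvLoopA cs (idx + 1)
        else
          false
      else
        pvLoopA cs idx

def supervocalic (word : String) : Bool := pvLoopA word.toList 0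

-- ===== PORT B =====
-- ''.join(c for c in word if c in VOWELS) == 'aeiou'
def supervocalic_alt (word : String) : Bool := word.toList.filter pvIsVowel == ['a', 'e', 'i', 'o', 'u']

-- ===== PRECONDITION & SPEC =====
def Spec_supervocalic (word : String) (out : Bool) : Prop := out = supervocalic_alt word
instance (word : String) (out : Bool) : Decidable (Spec_supervocalic word out) := by unfold Spec_supervocalic; infer_instance

-- ===== CLAIM (what is proved, stated in full; the proofs are below) =====
def Claim_equal_supervocalic : Prop := ∀ (word : String), Dom_supervocalic word → Spec_supervocalic word (supervocalic word)

-- ===== LEMMAS AND PROOFS =====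
-- A's loop from pointer idx accepts exactly the words whose vowel subsequence is the tail of 'aeiou' from idx
theorem pvLoopA_eq (cs : List Char) : ∀ idx : Nat, idx ≤ 5 →
    pvLoopA cs idx = (cs.filter pvIsVowel == pvVowelsList.drop idx) := by
  induction cs with
  | nil =>
      intro idx h
      interval_cases idx <;> decide
  | cons c cs ih =>
      intro idx h
      by_cases hv : pvIsVowel c = true
      · have hc : c = 'a' ∨ c = 'e' ∨ c = 'i' ∨ c = 'o' ∨ c = 'u' := by
          simp only [pvIsVowel, Bool.or_eq_true, beq_iff_eq] at hv
          tauto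
        interval_cases idx <;>
          rcases hc with rfl | rfl | rfl | rfl | rfl <;>
            simp_all [pvLoopA, pvIsVowel, pvVowelsList]
      · rw [show pvLoopA (c :: cs) idx = pvLoopA cs idx from by simp [pvLoopA, hv],
          List.filter_cons_of_neg (by simpa using hv)]
        exact ih idx h

-- ===== VERDICT (by name: the statement is the Claim_ definition above) =====
theorem supervocalic_spec : Claim_equal_supervocalic := by
  intro word _
  unfold Spec_supervocalic supervocalic supervocalic_alt
  rw [pvLoopA_eq _ 0 (by omega)]
  rfl
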